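-- pv_equiv track=rewrite | github.com/sainyam/Hyper-Code | reproducibility/scripts/fig9.py | roundl4
-- ===== SOURCE A (Python) =====
-- def roundl4(x,th):
--     l=[]
--     for v in x:
--         if v<=th:
--             l.append(0)
--         elif v<=2*th:
--             l.append(1)
--         elif v<=3*th:
--             l.append(2)
--         else:# v<=4*th:
--             l.append(3)
--     return l
-- ===== SOURCE B (Python) =====
-- def roundl4(x, th):
--     # Threshold-major staged passes: start from an all-zero bucket vector and,
--     # for each of the three cut points th, 2*th, 3*th, sweep the whole list
--     # once, bumping the bucket of every element strictly above that cut.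
--     out = [0] * len(x)
--     for k in (1, 2, 3):
--         cut = k * th
--         out = [o + (v > cut) for o, v in zip(out, x)]
--     return out
-- ===== Notes on version B (the rewrite author's own statement) =====
-- stated objective: alternative
-- what changed: Inverts the loop nesting: instead of classifying each element once through an if-elif ladder, B makes three threshold-major passes over a zero-initialized bucket vector, incrementing every position whose element exceeds the current cut.
-- outside the precondition, e.g. on roundl4([-2], -1): A returns [0], B returns [1]
import Mathlib
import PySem

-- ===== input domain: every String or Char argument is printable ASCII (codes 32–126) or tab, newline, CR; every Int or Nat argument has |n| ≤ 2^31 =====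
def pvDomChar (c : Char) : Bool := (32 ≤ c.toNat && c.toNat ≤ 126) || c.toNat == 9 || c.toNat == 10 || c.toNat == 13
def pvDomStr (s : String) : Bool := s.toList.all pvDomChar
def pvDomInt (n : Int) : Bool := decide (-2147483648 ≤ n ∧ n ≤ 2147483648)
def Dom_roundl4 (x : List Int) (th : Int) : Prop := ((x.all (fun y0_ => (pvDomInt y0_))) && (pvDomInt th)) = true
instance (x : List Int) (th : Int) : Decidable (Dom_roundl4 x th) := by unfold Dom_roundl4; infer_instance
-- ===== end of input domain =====

-- B replaces A's per-element if-elif ladder by three threshold-major passes that increment a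
-- zero-initialized bucket vector for each element above the current cut (objective: alternative).


-- ===== PORT A =====
def roundl4 (x : List Int) (th : Int) : List Int :=
  x.foldl (fun l v =>
    l ++ [if v ≤ th then (0 : Int)
          else if v ≤ 2 * th then 1
          else if v ≤ 3 * th then 2
          else 3]) []

-- ===== PORT B =====
def roundl4_alt (x : List Int) (th : Int) : List Int :=
  ([1, 2, 3] : List Int).foldl (fun out k =>
    let cut := k * th
    (out.zip x).map (fun p => p.1 + (if cut < p.2 then 1 else 0)))
    (List.replicate x.length 0)

-- ===== PRECONDITION & SPEC =====
-- Pre_ excludes inputs with negative th where some element lies strictly between 3*th and th: there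
-- the quartile breaks are descending, so A's first-match ladder and B's threshold count are equally
-- arbitrary readings of an unspecified corner (A returns values there that B does not match).
def Pre_roundl4 (x : List Int) (th : Int) : Prop :=
  0 ≤ th ∨ ∀ v ∈ x, v ≤ 3 * th ∨ th < v
instance (x : List Int) (th : Int) : Decidable (Pre_roundl4 x th) := by unfold Pre_roundl4; infer_instance
def pvWitness_roundl4 : List Int × Int := ([0, 5, 11, 16, 30], 10)
def Spec_roundl4 (x : List Int) (th : Int) (out : List Int) : Prop := out = roundl4_alt x th
instance (x : List Int) (th : Int) (out : List Int) : Decidable (Spec_roundl4 x th out) := by unfold Spec_roundl4; infer_instance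

-- ===== CLAIM (what is proved, stated in full; the proofs are below) =====
def Claim_equal_roundl4 : Prop := ∀ (x : List Int) (th : Int), Dom_roundl4 x th → Pre_roundl4 x th → Spec_roundl4 x th (roundl4 x th)

-- ===== LEMMAS AND PROOFS =====

lemma foldl_append_singleton (f : Int → Int) (x : List Int) (acc : List Int) :
    x.foldl (fun l v => l ++ [f v]) acc = acc ++ x.map f := by
  induction x generalizing acc with
  | nil => simp
  | cons v xs ih => simp [List.foldl, ih]

-- one threshold-major pass over an output vector of the shape x.map g
lemma zip_step (g : Int → Int) (c : Int) (x : List Int) :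
    ((x.map g).zip x).map (fun p => p.1 + (if c < p.2 then 1 else 0))
      = x.map (fun v => g v + (if c < v then 1 else 0)) := by
  induction x with
  | nil => simp
  | cons v xs ih => simp [ih]

lemma bucket_eq (th v : Int) (h : 0 ≤ th ∨ v ≤ 3 * th ∨ th < v) :
    (if v ≤ th then (0 : Int)
     else if v ≤ 2 * th then 1
     else if v ≤ 3 * th then 2
     else 3)
    = ((0 : Int) + (if 1 * th < v then 1 else 0) + (if 2 * th < v then 1 else 0))
        + (if 3 * th < v then 1 else 0) := by
  split_ifs <;> omega

lemma alt_eq_map (x : List Int) (th : Int) :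
    roundl4_alt x th
      = x.map (fun v =>
          ((0 : Int) + (if 1 * th < v then 1 else 0) + (if 2 * th < v then 1 else 0))
            + (if 3 * th < v then 1 else 0)) := by
  unfold roundl4_alt
  have h0 : List.replicate x.length (0 : Int) = x.map (fun _ => 0) := by
    simp [List.map_const']
  simp only [List.foldl, h0, zip_step]

-- ===== VERDICT (by name: the statement is the Claim_ definition above) =====
theorem roundl4_spec : Claim_equal_roundl4 := by
  intro x th _ hpre
  unfold Spec_roundl4 roundl4
  rw [alt_eq_map, foldl_append_singleton, List.nil_append]
  refine List.map_congr_left (fun v hv => ?_)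
  apply bucket_eq
  rcases hpre with h | h
  · exact Or.inl h
  · exact Or.inr (h v hv)
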